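/- CodeFD.lean -- generated by tools/mkbytes_fixed.py: where every function of fixed/jsmn_d.bin is inside the image. -/
import X86.Derived.Prog.Reach
import X86.Derived.Prog.StateSimp
import Prog.Jsmn.Fixed.JsmnFDBytes

namespace X86
namespace JsmnFD
open X86.User (CodeAt RegsKept Span FlagsOK Layout toNat_add_ofNat toNat_ofNat_lt' add_ofNat_add)
open JsmnFDBytes

set_option maxRecDepth 1000000
set_option maxHeartbeats 4000000

theorem tjfd_start_jsmn_code {mem : User.Mem} (h : CodeAt mem 0x100000 image_bytes) : CodeAt mem 0x100000 start_jsmn_bytes :=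
  h.at _ 0x0 54 _ (by decide) (by decide) (by decide)
theorem tjfd_jsmn_alloc_token_code {mem : User.Mem} (h : CodeAt mem 0x100000 image_bytes) : CodeAt mem 0x100040 jsmn_alloc_token_bytes :=
  h.at _ 0x40 54 _ (by decide) (by decide) (by decide)
theorem tjfd_jsmn_fill_token_code {mem : User.Mem} (h : CodeAt mem 0x100000 image_bytes) : CodeAt mem 0x100076 jsmn_fill_token_bytes :=
  h.at _ 0x76 16 _ (by decide) (by decide) (by decide)
theorem tjfd_jsmn_parse_primitive_code {mem : User.Mem} (h : CodeAt mem 0x100000 image_bytes) : CodeAt mem 0x100086 jsmn_parse_primitive_bytes :=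
  h.at _ 0x86 174 _ (by decide) (by decide) (by decide)
theorem tjfd_jsmn_parse_string_code {mem : User.Mem} (h : CodeAt mem 0x100000 image_bytes) : CodeAt mem 0x100134 jsmn_parse_string_bytes :=
  h.at _ 0x134 326 _ (by decide) (by decide) (by decide)
theorem tjfd_jsmn_parse_core_code {mem : User.Mem} (h : CodeAt mem 0x100000 image_bytes) : CodeAt mem 0x10027a jsmn_parse_core_bytes :=
  h.at _ 0x27a 731 _ (by decide) (by decide) (by decide)
theorem tjfd_jsmn_parse_code {mem : User.Mem} (h : CodeAt mem 0x100000 image_bytes) : CodeAt mem 0x100555 jsmn_parse_bytes :=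
  h.at _ 0x555 95 _ (by decide) (by decide) (by decide)
theorem tjfd_jsmn_init_code {mem : User.Mem} (h : CodeAt mem 0x100000 image_bytes) : CodeAt mem 0x1005b4 jsmn_init_bytes :=
  h.at _ 0x5b4 21 _ (by decide) (by decide) (by decide)
theorem tjfd_jsmn_run_code {mem : User.Mem} (h : CodeAt mem 0x100000 image_bytes) : CodeAt mem 0x1005c9 jsmn_run_bytes :=
  h.at _ 0x5c9 65 _ (by decide) (by decide) (by decide)
theorem tjfd_jsmn_main_code {mem : User.Mem} (h : CodeAt mem 0x100000 image_bytes) : CodeAt mem 0x10060a jsmn_main_bytes :=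
  h.at _ 0x60a 38 _ (by decide) (by decide) (by decide)
theorem tjfd_start_call6_code {mem : User.Mem} (h : CodeAt mem 0x100000 image_bytes) : CodeAt mem 0x100630 start_call6_bytes :=
  h.at _ 0x630 75 _ (by decide) (by decide) (by decide)

end JsmnFD
end X86
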